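-- pv_equiv track=rewrite | github.com/Nadaali18/automata_practical_exam_4573 | automata_practical/question2_CYK_algorithm.py | cyk_parse
-- ===== SOURCE A (Python) =====
-- grammar = {
--     "S": [("A", "B")],
--     "A": [("a",)],
--     "B": [("b",)]
-- }
--
-- def cyk_parse(string):
--     n = len(string)
--     if n == 0:
--         return False
--     table = [[set() for _ in range(n)] for _ in range(n)]
--     for i in range(n):
--         for variable, rules in grammar.items():
--             for rule in rules:
--                 if len(rule) == 1 and rule[0] == string[i]:
--                     table[i][i].add(variable)
--     for length in range(2, n + 1):
--         for start in range(n - length + 1):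
--             end = start + length - 1
--             for split in range(start, end):
--                 for variable, rules in grammar.items():
--                     for rule in rules:
--                         if len(rule) == 2:
--                             left, right = rule
--                             if left in table[start][split] and right in table[split+1][end]:
--                                 table[start][end].add(variable)
--     return "S" in table[0][n - 1]
-- ===== SOURCE B (Python) =====
-- def cyk_parse(string):
--     # The fixed grammar (S -> AB, A -> 'a', B -> 'b') derives exactly "ab".
--     return string == "ab"
-- ===== Notes on version B (the rewrite author's own statement) =====
-- stated objective: faster
-- what changed: The fixed grammar S->AB, A->'a', B->'b' derives exactly the string "ab", so the O(n^3) CYK dynamic-programming table is replaced by the single comparison string == "ab".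
import Mathlib
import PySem

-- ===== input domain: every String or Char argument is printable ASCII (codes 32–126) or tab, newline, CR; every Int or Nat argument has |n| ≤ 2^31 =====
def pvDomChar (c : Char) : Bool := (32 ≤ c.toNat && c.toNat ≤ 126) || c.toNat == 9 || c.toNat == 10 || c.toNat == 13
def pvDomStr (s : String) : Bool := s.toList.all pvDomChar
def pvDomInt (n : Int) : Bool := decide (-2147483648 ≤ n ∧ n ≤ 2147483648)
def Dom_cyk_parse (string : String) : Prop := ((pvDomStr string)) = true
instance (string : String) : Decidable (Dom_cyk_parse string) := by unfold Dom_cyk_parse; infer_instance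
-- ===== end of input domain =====

-- B replaces A's CYK table computation by the single comparison string == "ab",
-- exact because the fixed grammar derives only "ab".

-- ===== PORT A =====
-- grammar = {"S": [("A","B")], "A": [("a",)], "B": [("b",)]}  (tuples of strings ported as List String)
def pvGrammar : List (String × List (List String)) :=
  [("S", [["A", "B"]]), ("A", [["a"]]), ("B", [["b"]])]

-- table[i][j] (always accessed with in-range indices in A)
def pvCell (t : List (List (PySem.Set String))) (i j : Int) : PySem.Set String :=
  PySem.List.pyGetD (PySem.List.pyGetD t i []) j PySem.Set.empty

-- table[i][j].add(v) : the set at (i, j) gains v, everything else is unchanged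
def pvTblAdd (t : List (List (PySem.Set String))) (i j : Int) (v : String) :
    List (List (PySem.Set String)) :=
  PySem.List.pySetD t i
    (PySem.List.pySetD (PySem.List.pyGetD t i []) j (PySem.Set.add (pvCell t i j) v))

def cyk_parse (string : String) : Bool :=
  let s := string.toList
  let n : Int := PySem.Str.len string
  if n == 0 then false
  else
    -- table = [[set() for _ in range(n)] for _ in range(n)]
    let table : List (List (PySem.Set String)) :=
      (PySem.List.pyRange 0 n 1).map (fun _ =>
        (PySem.List.pyRange 0 n 1).map (fun _ => PySem.Set.empty))
    -- for i in range(n): … table[i][i].add(variable)   (string[i] is the 1-char string; i is in range)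
    let table := (PySem.List.pyRange 0 n 1).foldl (fun t i =>
      pvGrammar.foldl (fun t vr =>
        vr.2.foldl (fun t rule =>
          if (rule.length == 1) &&
             (rule.getD 0 "" == String.ofList [PySem.List.pyGetD s i ' ']) then
            pvTblAdd t i i vr.1
          else t) t) t) table
    -- for length in range(2, n+1): for start in range(n-length+1): end = start+length-1; for split …
    let table := (PySem.List.pyRange 2 (n + 1) 1).foldl (fun t length =>
      (PySem.List.pyRange 0 (n - length + 1) 1).foldl (fun t start =>
        let e := start + length - 1
        (PySem.List.pyRange start e 1).foldl (fun t split =>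
          pvGrammar.foldl (fun t vr =>
            vr.2.foldl (fun t rule =>
              if rule.length == 2 then
                let left := rule.getD 0 ""
                let right := rule.getD 1 ""
                if PySem.Set.contains (pvCell t start split) left &&
                   PySem.Set.contains (pvCell t (split + 1) e) right then
                  pvTblAdd t start e vr.1
                else t
              else t) t) t) t) t) table
    PySem.Set.contains (pvCell table 0 (n - 1)) "S"

-- ===== PORT B =====
def cyk_parse_alt (string : String) : Bool := string == "ab"

-- ===== PRECONDITION & SPEC =====
def Spec_cyk_parse (string : String) (out : Bool) : Prop := out = cyk_parse_alt string
instance (string : String) (out : Bool) : Decidable (Spec_cyk_parse string out) := by unfold Spec_cyk_parse; infer_instance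

-- ===== CLAIM (what is proved, stated in full; the proofs are below) =====
def Claim_equal_cyk_parse : Prop := ∀ (string : String), Dom_cyk_parse string → Spec_cyk_parse string (cyk_parse string)

-- ===== LEMMAS AND PROOFS =====

-- table invariant: every entry of the table is explained by the grammar
def pvInv (s : List Char) (t : List (List (PySem.Set String))) : Prop :=
  ∀ i j v, 0 ≤ i → 0 ≤ j → v ∈ pvCell t i j →
    (v = "A" ∧ j = i ∧ s[i.toNat]? = some 'a') ∨
    (v = "B" ∧ j = i ∧ s[i.toNat]? = some 'b') ∨
    (v = "S" ∧ j = i + 1 ∧ s[i.toNat]? = some 'a' ∧ s[j.toNat]? = some 'b')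

theorem pvCell_eq (t : List (List (PySem.Set String))) {i j : Int} (hi : 0 ≤ i) (hj : 0 ≤ j) :
    pvCell t i j = ((t[i.toNat]?.getD [])[j.toNat]?.getD PySem.Set.empty) := by
  unfold pvCell
  rw [PySem.List.pyGetD_of_nonneg _ _ hi, PySem.List.pyGetD_of_nonneg _ _ hj,
    List.getD_eq_getElem?_getD, List.getD_eq_getElem?_getD]

theorem mem_pvTblAdd {t : List (List (PySem.Set String))} {i j i' j' : Int} {w v : String}
    (hi : 0 ≤ i) (hj : 0 ≤ j) (hi' : 0 ≤ i') (hj' : 0 ≤ j')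
    (h : v ∈ pvCell (pvTblAdd t i j w) i' j') :
    v ∈ pvCell t i' j' ∨ (v = w ∧ i' = i ∧ j' = j) := by
  unfold pvTblAdd at h
  rw [pvCell_eq _ hi' hj'] at h ⊢
  rw [PySem.List.pySetD_of_nonneg _ _ hi, PySem.List.pySetD_of_nonneg _ _ hj] at h
  rw [List.getElem?_set] at h
  by_cases hii : i.toNat = i'.toNat
  · rw [if_pos hii] at h
    by_cases hlen : i.toNat < t.length
    · rw [if_pos hlen] at h
      simp only [Option.getD_some] at h
      rw [PySem.List.pyGetD_of_nonneg _ _ hi, List.getD_eq_getElem?_getD] at h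
      rw [List.getElem?_set] at h
      by_cases hjj : j.toNat = j'.toNat
      · rw [if_pos hjj] at h
        by_cases hrl : j.toNat < (t[i.toNat]?.getD []).length
        · rw [if_pos hrl] at h
          simp only [Option.getD_some] at h
          rcases (PySem.Set.mem_add _ _ _).mp h with h1 | h1
          · rw [pvCell_eq _ hi hj, hii, hjj] at h1
            exact Or.inl h1
          · exact Or.inr ⟨h1, by omega, by omega⟩
        · rw [if_neg hrl] at h
          simp [PySem.Set.empty] at h
      · rw [if_neg hjj] at h
        rw [← hii]
        exact Or.inl h
    · rw [if_neg hlen] at h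
      simp [PySem.Set.empty] at h
  · rw [if_neg hii] at h
    exact Or.inl h

theorem mem_ite_pvTblAdd {c : Prop} [Decidable c] {t : List (List (PySem.Set String))}
    {p q i' j' : Int} {w v : String}
    (hp : 0 ≤ p) (hq : 0 ≤ q) (hi' : 0 ≤ i') (hj' : 0 ≤ j')
    (h : v ∈ pvCell (if c then pvTblAdd t p q w else t) i' j') :
    v ∈ pvCell t i' j' ∨ (c ∧ v = w ∧ i' = p ∧ j' = q) := by
  split_ifs at h with hc
  · rcases mem_pvTblAdd hp hq hi' hj' h with h1 | ⟨h1, h2, h3⟩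
    · exact Or.inl h1
    · exact Or.inr ⟨hc, h1, h2, h3⟩
  · exact Or.inl h

theorem pvChar_of_getD {s : List Char} {i : Int} (h0 : 0 ≤ i) {c : Char} (hne : c ≠ ' ')
    (h : PySem.List.pyGetD s i ' ' = c) : s[i.toNat]? = some c := by
  rw [PySem.List.pyGetD_of_nonneg _ _ h0, List.getD_eq_getElem?_getD] at h
  rcases hg : s[i.toNat]? with _ | d
  · rw [hg] at h; simp at h; exact absurd h.symm hne
  · rw [hg] at h; simp at h; rw [h]

theorem pvInv_init (s : List Char) (n : Int) :
    pvInv s ((PySem.List.pyRange 0 n 1).map (fun _ =>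
      (PySem.List.pyRange 0 n 1).map (fun _ => PySem.Set.empty))) := by
  intro i j v hi hj hv
  rw [pvCell_eq _ hi hj] at hv
  exfalso
  rcases h1 : ((PySem.List.pyRange 0 n 1).map (fun _ =>
      (PySem.List.pyRange 0 n 1).map (fun _ => (PySem.Set.empty : PySem.Set String))))[i.toNat]? with _ | row
  · rw [h1] at hv; simp [PySem.Set.empty] at hv
  · rw [h1] at hv
    have hrow : row = (PySem.List.pyRange 0 n 1).map (fun _ => (PySem.Set.empty : PySem.Set String)) := by
      have hm := List.mem_of_getElem? h1
      rcases List.mem_map.mp hm with ⟨_, _, hr⟩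
      exact hr.symm
    subst hrow
    simp only [Option.getD_some, List.getElem?_map] at hv
    rcases h2 : (PySem.List.pyRange 0 n 1)[j.toNat]? with _ | x
    · rw [h2] at hv; simp [PySem.Set.empty] at hv
    · rw [h2] at hv; simp [PySem.Set.empty] at hv

theorem pvInv_phase1 (s : List Char) (n : Int) (t : List (List (PySem.Set String)))
    (ht : pvInv s t) :
    pvInv s ((PySem.List.pyRange 0 n 1).foldl (fun t i =>
      pvGrammar.foldl (fun t vr =>
        vr.2.foldl (fun t rule =>
          if (rule.length == 1) &&
             (rule.getD 0 "" == String.ofList [PySem.List.pyGetD s i ' ']) then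
            pvTblAdd t i i vr.1
          else t) t) t) t) := by
  refine List.foldlRecOn _ _ ht ?_
  intro t ht i hi
  have hmem := (PySem.List.mem_pyRange_one).mp hi
  have h0 : 0 ≤ i := hmem.1
  intro i' j' v hi' hj' hv
  simp only [pvGrammar, List.foldl] at hv
  norm_num at hv
  rcases mem_ite_pvTblAdd h0 h0 hi' hj' hv with hv1 | ⟨hb, hvv, hieq, hjeq⟩
  · rcases mem_ite_pvTblAdd h0 h0 hi' hj' hv1 with hv2 | ⟨ha, hvv, hieq, hjeq⟩
    · exact ht _ _ _ hi' hj' hv2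
    · subst hvv
      refine Or.inl ⟨rfl, by omega, ?_⟩
      rw [hieq]
      exact pvChar_of_getD h0 (by decide) (by simpa using (congrArg String.toList ha).symm)
  · subst hvv
    refine Or.inr (Or.inl ⟨rfl, by omega, ?_⟩)
    rw [hieq]
    exact pvChar_of_getD h0 (by decide) (by simpa using (congrArg String.toList hb).symm)

theorem pvInv_phase2 (s : List Char) (n : Int) (t : List (List (PySem.Set String)))
    (ht : pvInv s t) :
    pvInv s ((PySem.List.pyRange 2 (n + 1) 1).foldl (fun t length =>
      (PySem.List.pyRange 0 (n - length + 1) 1).foldl (fun t start =>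
        let e := start + length - 1
        (PySem.List.pyRange start e 1).foldl (fun t split =>
          pvGrammar.foldl (fun t vr =>
            vr.2.foldl (fun t rule =>
              if rule.length == 2 then
                let left := rule.getD 0 ""
                let right := rule.getD 1 ""
                if PySem.Set.contains (pvCell t start split) left &&
                   PySem.Set.contains (pvCell t (split + 1) e) right then
                  pvTblAdd t start e vr.1
                else t
              else t) t) t) t) t) t) := by
  refine List.foldlRecOn _ _ ht ?_
  intro t ht lg hlg
  refine List.foldlRecOn _ _ ht ?_
  intro t ht st hst
  refine List.foldlRecOn _ _ ht ?_
  intro t ht sp hsp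
  have hst0 : 0 ≤ st := ((PySem.List.mem_pyRange_one).mp hst).1
  have hsp0 : st ≤ sp := ((PySem.List.mem_pyRange_one).mp hsp).1
  have hspe : sp < st + lg - 1 := ((PySem.List.mem_pyRange_one).mp hsp).2
  intro i' j' v hi' hj' hv
  simp only [pvGrammar, List.foldl] at hv
  norm_num at hv
  split_ifs at hv with hc
  · rcases mem_pvTblAdd hst0 (by omega) hi' hj' hv with hv1 | ⟨hvv, hip, hjq⟩
    · exact ht _ _ _ hi' hj' hv1
    · subst hvv
      have hA := ht _ _ _ (by omega) (by omega) hc.1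
      have hB := ht _ _ _ (by omega) (by omega) hc.2
      rcases hA with ⟨_, hspq, hgA⟩ | ⟨hAB, _⟩ | ⟨hAB, _⟩
      · rcases hB with ⟨hBA, _⟩ | ⟨_, he, hgB⟩ | ⟨hBA, _⟩
        · exact absurd hBA (by decide)
        · refine Or.inr (Or.inr ⟨rfl, by omega, ?_, ?_⟩)
          · rw [hip]; exact hgA
          · rw [hjq, he]; exact hgB
        · exact absurd hBA (by decide)
      · exact absurd hAB (by decide)
      · exact absurd hAB (by decide)
  · exact ht _ _ _ hi' hj' hv

theorem pv_list_eq_ab {s : List Char} (hlen : s.length = 2)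
    (ha : s[0]? = some 'a') (hb : s[1]? = some 'b') : s = ['a', 'b'] := by
  rcases s with _ | ⟨c0, _ | ⟨c1, _ | ⟨c2, rest⟩⟩⟩ <;> simp_all

theorem cyk_parse_eq_true_imp (string : String) :
    cyk_parse string = true → string = "ab" := by
  intro h
  unfold cyk_parse at h
  by_cases hz : ((PySem.Str.len string == 0) = true)
  · simp only [hz, if_true] at h; exact absurd h (by simp)
  · simp only [hz] at h
    rw [if_neg (by simp)] at h
    set s := string.toList with hs
    clear_value s
    have hn : PySem.Str.len string = (s.length : Int) := by
      simp [PySem.Str.len_eq, hs]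
    have hnz : s.length ≠ 0 := by
      intro hc
      exact hz (by rw [hn, hc]; decide)
    have h1 := pvInv_phase1 s (PySem.Str.len string) _ (pvInv_init s (PySem.Str.len string))
    have h2 := pvInv_phase2 s (PySem.Str.len string) _ h1
    have hmem := (PySem.Set.contains_iff _ _).mp h
    have h3 := h2 0 (PySem.Str.len string - 1) "S" le_rfl (by rw [hn]; omega) hmem
    rcases h3 with ⟨hv, _⟩ | ⟨hv, _⟩ | ⟨_, hj, hga, hgb⟩
    · exact absurd hv (by decide)
    · exact absurd hv (by decide)
    · have hlen : s.length = 2 := by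
        rw [hn] at hj; omega
      have ha : s[0]? = some 'a' := by simpa using hga
      rw [hn] at hgb
      have hidx : (((s.length : Int)) - 1).toNat = 1 := by omega
      rw [hidx] at hgb
      have hslist : s = ['a', 'b'] := pv_list_eq_ab hlen ha hgb
      have : string.toList = "ab".toList := by rw [← hs, hslist]; decide
      exact String.toList_inj.mp this

set_option maxHeartbeats 2000000 in
theorem cyk_parse_ab : cyk_parse "ab" = true := by decide

-- ===== VERDICT (by name: the statement is the Claim_ definition above) =====
theorem cyk_parse_spec : Claim_equal_cyk_parse := by
  intro string _
  unfold Spec_cyk_parse cyk_parse_alt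
  by_cases h : string = "ab"
  · subst h; simpa using cyk_parse_ab
  · have hne : (string == "ab") = false := by simpa using h
    rw [hne]
    by_cases hc : cyk_parse string = true
    · exact absurd (cyk_parse_eq_true_imp string hc) h
    · simpa using hc
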